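-- pv_equiv track=rewrite | github.com/jawadb0199/kg_jawadb0199_2021 | main.py | is_one_to_one
-- ===== SOURCE A (Python) =====
-- def is_one_to_one(str1: str, str2: str) -> bool:
--     # By definition of one-to-one function there can be a char in str2 that
--     # isn't mapped to a char in str1 so str2 can be longer than str1
--     if len(str1) > len(str2):
--         return False
--
--     # Dictionary to store mappings
--     dictionary = dict()
--
--     for i in range(len(str1)):
--         c1 = str1[i];
--         c2 = str2[i];
--         # If char at index i -> False
--         if c1 in dictionary:
--             if c2 != dictionary[c1]:
--                 return False
--         # Add new mapping
--         else:
--             dictionary[c1] = c2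
--
--
--     return True
-- ===== SOURCE B (Python) =====
-- def is_one_to_one(str1: str, str2: str) -> bool:
--     if len(str1) > len(str2):
--         return False
--     # The char mapping is consistent iff each char of str1 occurs in
--     # exactly one distinct (source, target) pair.
--     return len(set(zip(str1, str2))) == len(set(str1))
-- ===== Notes on version B (the rewrite author's own statement) =====
-- stated objective: simpler
-- what changed: Replaces the incremental dict-building conflict scan with early return by a single set-cardinality comparison: len(set(zip(str1,str2))) == len(set(str1)).
import Mathlib
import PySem

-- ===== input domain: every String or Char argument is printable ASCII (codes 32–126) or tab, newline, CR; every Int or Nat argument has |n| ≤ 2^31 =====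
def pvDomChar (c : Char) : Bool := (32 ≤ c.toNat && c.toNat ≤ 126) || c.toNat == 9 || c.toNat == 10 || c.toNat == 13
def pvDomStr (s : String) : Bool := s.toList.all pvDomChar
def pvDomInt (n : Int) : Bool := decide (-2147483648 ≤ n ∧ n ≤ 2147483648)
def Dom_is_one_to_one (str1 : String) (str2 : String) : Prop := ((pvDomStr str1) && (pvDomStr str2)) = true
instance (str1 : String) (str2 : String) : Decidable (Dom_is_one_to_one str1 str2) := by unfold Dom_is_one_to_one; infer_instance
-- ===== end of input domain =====

-- B replaces A's incremental dict-building conflict scan (with early return) by a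
-- single set-cardinality comparison len(set(zip(str1,str2))) == len(set(str1)); objective: simpler.

-- ===== PORT A =====
-- A's loop 'for i in range(len(str1)): c1 = str1[i]; c2 = str2[i]; …' walks the two
-- strings in lockstep; ported as simultaneous structural recursion (the guard ensures
-- len str1 ≤ len str2, so str2 never runs out; the [] case for str2 is unreachable then).
def isOneToOneLoop : List Char → List Char → PySem.Dict Char Char → Bool
  | [], _, _ => true
  | _ :: _, [], _ => true
  | c1 :: t1, c2 :: t2, d =>
    match d.get? c1 with
    | some v => if c2 ≠ v then false else isOneToOneLoop t1 t2 d
    | none => isOneToOneLoop t1 t2 (d.insert c1 c2)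

def is_one_to_one (str1 : String) (str2 : String) : Bool :=
  if PySem.Str.len str1 > PySem.Str.len str2 then false
  else isOneToOneLoop str1.toList str2.toList PySem.Dict.empty

-- ===== PORT B =====
def is_one_to_one_alt (str1 : String) (str2 : String) : Bool :=
  if PySem.Str.len str1 > PySem.Str.len str2 then false
  else PySem.Set.len (PySem.Set.ofList (str1.toList.zip str2.toList))
         == PySem.Set.len (PySem.Set.ofList str1.toList)

-- ===== PRECONDITION & SPEC =====
def Spec_is_one_to_one (str1 : String) (str2 : String) (out : Bool) : Prop := out = is_one_to_one_alt str1 str2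
instance (str1 : String) (str2 : String) (out : Bool) : Decidable (Spec_is_one_to_one str1 str2 out) := by unfold Spec_is_one_to_one; infer_instance

-- ===== CLAIM (what is proved, stated in full; the proofs are below) =====
def Claim_equal_is_one_to_one : Prop := ∀ (str1 : String) (str2 : String), Dom_is_one_to_one str1 str2 → Spec_is_one_to_one str1 str2 (is_one_to_one str1 str2)

-- ===== LEMMAS AND PROOFS =====

-- "the pair list is a function": equal keys force equal values
def PairsFun (P : List (Char × Char)) : Prop :=
  ∀ p ∈ P, ∀ q ∈ P, p.1 = q.1 → p.2 = q.2

-- the dict agrees with every pair it already knows about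
def PairsCompat (P : List (Char × Char)) (d : PySem.Dict Char Char) : Prop :=
  ∀ p ∈ P, ∀ v, d.get? p.1 = some v → v = p.2

lemma pairsFun_cons (a b : Char) (P : List (Char × Char)) :
    PairsFun ((a, b) :: P) ↔ PairsFun P ∧ ∀ q ∈ P, q.1 = a → q.2 = b := by
  constructor
  · intro hf
    refine ⟨fun p hp q hq => hf p (List.mem_cons_of_mem _ hp) q (List.mem_cons_of_mem _ hq), ?_⟩
    intro q hq h
    exact (hf (a, b) List.mem_cons_self q (List.mem_cons_of_mem _ hq) h.symm).symm
  · rintro ⟨h1, h2⟩ p hp q hq hpq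
    rcases List.mem_cons.1 hp with rfl | hp <;> rcases List.mem_cons.1 hq with rfl | hq
    · rfl
    · exact (h2 q hq hpq.symm).symm
    · exact h2 p hp hpq
    · exact h1 p hp q hq hpq

lemma pairsCompat_cons (a b : Char) (P : List (Char × Char)) (d : PySem.Dict Char Char) :
    PairsCompat ((a, b) :: P) d ↔ (∀ v, d.get? a = some v → v = b) ∧ PairsCompat P d := by
  simp [PairsCompat]

lemma pairsCompat_insert (a b : Char) (P : List (Char × Char)) (d : PySem.Dict Char Char)
    (hget : d.get? a = none) :
    PairsCompat P (d.insert a b) ↔ (∀ q ∈ P, q.1 = a → q.2 = b) ∧ PairsCompat P d := by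
  constructor
  · intro h
    refine ⟨?_, ?_⟩
    · intro q hq hqa
      exact (h q hq b (by rw [PySem.Dict.get?_insert, if_pos hqa])).symm
    · intro q hq v hv
      by_cases hqa : q.1 = a
      · rw [hqa, hget] at hv; cases hv
      · exact h q hq v (by rw [PySem.Dict.get?_insert, if_neg hqa]; exact hv)
  · rintro ⟨hk, hc⟩ q hq v hv
    rw [PySem.Dict.get?_insert] at hv
    by_cases hqa : q.1 = a
    · rw [if_pos hqa] at hv
      injection hv with h
      rw [← h]; exact (hk q hq hqa).symm
    · rw [if_neg hqa] at hv
      exact hc q hq v hv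

-- invariant of A's loop
lemma loop_iff (l1 l2 : List Char) (d : PySem.Dict Char Char) :
    isOneToOneLoop l1 l2 d = true ↔ PairsFun (l1.zip l2) ∧ PairsCompat (l1.zip l2) d := by
  induction l1 generalizing l2 d with
  | nil => simp [isOneToOneLoop, PairsFun, PairsCompat]
  | cons c1 t1 ih =>
    cases l2 with
    | nil => simp [isOneToOneLoop, PairsFun, PairsCompat]
    | cons c2 t2 =>
      rw [List.zip_cons_cons, pairsFun_cons, pairsCompat_cons]
      cases hget : PySem.Dict.get? d c1 with
      | some v =>
        rw [show isOneToOneLoop (c1 :: t1) (c2 :: t2) d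
              = if c2 ≠ v then false else isOneToOneLoop t1 t2 d from by
            simp [isOneToOneLoop, hget]]
        by_cases hv : c2 = v
        · rw [if_neg (by simp [hv]), ih]
          constructor
          · rintro ⟨hf, hc⟩
            refine ⟨⟨hf, fun q hq hq1 => ?_⟩, fun w hw => ?_, hc⟩
            · have h1 := hc q hq v (by rw [hq1]; exact hget)
              exact h1.symm.trans hv.symm
            · injection hw with h; exact h ▸ hv.symm
          · rintro ⟨⟨hf, _⟩, _, hc⟩
            exact ⟨hf, hc⟩
        · rw [if_pos hv]
          constructor
          · intro h; cases h
          · rintro ⟨_, hhead, _⟩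
            exact absurd (hhead v rfl).symm hv
      | none =>
        rw [show isOneToOneLoop (c1 :: t1) (c2 :: t2) d
              = isOneToOneLoop t1 t2 (d.insert c1 c2) from by
            simp [isOneToOneLoop, hget]]
        rw [ih, pairsCompat_insert _ _ _ _ hget]
        constructor
        · rintro ⟨hf, hk, hc⟩
          refine ⟨⟨hf, hk⟩, ⟨fun v hv => ?_, hc⟩⟩
          cases hv
        · rintro ⟨⟨hf, hk⟩, _, hc⟩
          exact ⟨hf, hk, hc⟩

-- deduplicated length is the Finset cardinality
lemma ofList_length_eq_card {α : Type} [BEq α] [LawfulBEq α] [DecidableEq α] (xs : List α) :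
    (PySem.Set.ofList xs).length = xs.toFinset.card := by
  have hnd := PySem.Set.nodup_ofList xs
  have h : (PySem.Set.ofList xs).toFinset = xs.toFinset := by
    ext y; simp [PySem.Set.mem_ofList]
  rw [← h, List.toFinset_card_of_nodup hnd]

-- counting characterisation of functionality (the heart of B)
lemma card_eq_iff_fun (l1 l2 : List Char) (h : l1.length ≤ l2.length) :
    ((l1.zip l2).toFinset.card = l1.toFinset.card) ↔ PairsFun (l1.zip l2) := by
  have hmap : List.map Prod.fst (l1.zip l2) = l1 := List.map_fst_zip h
  have himg : (l1.zip l2).toFinset.image Prod.fst = l1.toFinset := by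
    have h0 : ((l1.zip l2).map Prod.fst).toFinset = (l1.zip l2).toFinset.image Prod.fst := by
      ext y; simp
    rw [← h0, hmap]
  constructor
  · intro hcard
    have h1 : ((l1.zip l2).toFinset.image Prod.fst).card = (l1.zip l2).toFinset.card := by
      rw [himg, hcard]
    have hinj := Finset.card_image_iff.1 h1
    intro p hp q hq hpq
    have h2 := hinj (by simpa using hp) (by simpa using hq) hpq
    rw [h2]
  · intro hf
    rw [← himg]
    exact (Finset.card_image_iff.2 (fun p hp q hq hpq =>
      Prod.ext hpq (hf p (by simpa using hp) q (by simpa using hq) hpq))).symm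

-- ===== VERDICT (by name: the statement is the Claim_ definition above) =====
theorem is_one_to_one_spec : Claim_equal_is_one_to_one := by
  intro str1 str2 _
  unfold Spec_is_one_to_one is_one_to_one is_one_to_one_alt
  by_cases hlen : PySem.Str.len str1 > PySem.Str.len str2
  · rw [if_pos hlen, if_pos hlen]
  · rw [if_neg hlen, if_neg hlen]
    have hle : str1.toList.length ≤ str2.toList.length := by
      simp only [PySem.Str.len_eq, not_lt] at hlen
      exact_mod_cast hlen
    rw [Bool.eq_iff_iff, loop_iff, beq_iff_eq]
    have hB : (PySem.Set.len (PySem.Set.ofList (str1.toList.zip str2.toList))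
            = PySem.Set.len (PySem.Set.ofList str1.toList))
        ↔ PairsFun (str1.toList.zip str2.toList) := by
      rw [← card_eq_iff_fun _ _ hle]
      unfold PySem.Set.len
      rw [ofList_length_eq_card, ofList_length_eq_card]
      exact Nat.cast_inj
    rw [hB]
    constructor
    · exact And.left
    · intro hf
      refine ⟨hf, fun p _ v hv => ?_⟩
      rw [PySem.Dict.get?_empty] at hv; cases hv
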